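-- pv_equiv track=rewrite | github.com/clairemorawski/python | Homework5/HW_Dict_To_Fill.py | exampleFour
-- ===== SOURCE A (Python) =====
-- def exampleFour(paramOne, paramTwo):
--     result = {}
--     for key in paramOne:
--         for value in paramTwo:
--             if value.startswith(key):
--                 result[key] = value
--                 break
--     return result
-- ===== SOURCE B (Python) =====
-- def exampleFour(paramOne, paramTwo):
--     keys = set(paramOne)
--     best = {}
--     for v in paramTwo:
--         p = ""
--         if p in keys and p not in best:
--             best[p] = v
--         for ch in v:
--             p += ch
--             if p in keys and p not in best:
--                 best[p] = v
--     return {k: best[k] for k in paramOne if k in best}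
-- ===== Notes on version B (the rewrite author's own statement) =====
-- stated objective: faster
-- what changed: Instead of scanning paramTwo once per key (nested loops with startswith), B scans each value of paramTwo once, enumerating its prefixes and recording in a dict the first value for each prefix that is a key, then emits the result in paramOne order.
import Mathlib
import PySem

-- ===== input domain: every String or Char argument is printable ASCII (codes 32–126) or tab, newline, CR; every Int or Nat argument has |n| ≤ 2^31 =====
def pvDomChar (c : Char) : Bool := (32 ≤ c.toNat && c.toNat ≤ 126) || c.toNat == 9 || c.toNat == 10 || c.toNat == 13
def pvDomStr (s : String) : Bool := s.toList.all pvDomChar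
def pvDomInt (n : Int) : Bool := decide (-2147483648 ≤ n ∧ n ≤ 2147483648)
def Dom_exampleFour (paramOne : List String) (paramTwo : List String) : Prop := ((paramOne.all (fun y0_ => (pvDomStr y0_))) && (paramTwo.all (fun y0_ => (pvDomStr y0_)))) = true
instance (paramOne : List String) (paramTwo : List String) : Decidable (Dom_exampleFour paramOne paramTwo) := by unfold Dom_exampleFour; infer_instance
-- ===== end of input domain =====

-- B replaces A's per-key scan of paramTwo by a single pass over paramTwo that indexes every
-- prefix of each value in a dict (objective: faster).

-- ===== PORT A =====
-- inner loop 'for value in paramTwo: if value.startswith(key): result[key] = value; break'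
def exampleFourInner (res : PySem.Dict String String) (key : String) : List String → PySem.Dict String String
  | [] => res
  | v :: rest =>
      if PySem.Str.startswith v key then res.insert key v
      else exampleFourInner res key rest

def exampleFour (paramOne : List String) (paramTwo : List String) : List (String × String) :=
  (paramOne.foldl (fun res key => exampleFourInner res key paramTwo) PySem.Dict.empty).items

-- ===== PORT B =====
-- one value of paramTwo: check the empty prefix, then extend p one char at a time,
-- recording v for every prefix that is a key and not yet assigned
def exampleFourStep (keys : PySem.Set String) (best : PySem.Dict String String) (v : String) :
    PySem.Dict String String :=
  let p : String := ""
  let best := if PySem.Set.contains keys p && !best.contains p then best.insert p v else best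
  (v.toList.foldl
    (fun st c =>
      let p := st.2.push c
      (if PySem.Set.contains keys p && !st.1.contains p then st.1.insert p v else st.1, p))
    (best, p)).1

def exampleFour_alt (paramOne : List String) (paramTwo : List String) : List (String × String) :=
  let keys := PySem.Set.ofList paramOne
  let best := paramTwo.foldl (exampleFourStep keys) PySem.Dict.empty
  (paramOne.foldl
    (fun res k =>
      match best.get? k with
      | some v => res.insert k v
      | none => res)
    PySem.Dict.empty).items

-- ===== PRECONDITION & SPEC =====
def Spec_exampleFour (paramOne : List String) (paramTwo : List String) (out : List (String × String)) : Prop := out = exampleFour_alt paramOne paramTwo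
instance (paramOne : List String) (paramTwo : List String) (out : List (String × String)) : Decidable (Spec_exampleFour paramOne paramTwo out) := by unfold Spec_exampleFour; infer_instance

-- ===== CLAIM (what is proved, stated in full; the proofs are below) =====
def Claim_equal_exampleFour : Prop := ∀ (paramOne : List String) (paramTwo : List String), Dom_exampleFour paramOne paramTwo → Spec_exampleFour paramOne paramTwo (exampleFour paramOne paramTwo)

-- ===== LEMMAS AND PROOFS =====

-- A's inner loop returns the first match of paramTwo (or leaves res untouched)
theorem exampleFourInner_eq (res : PySem.Dict String String) (key : String) (ws : List String) :
    exampleFourInner res key ws =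
      match ws.find? (fun v => PySem.Str.startswith v key) with
      | some v => res.insert key v
      | none => res := by
  induction ws with
  | nil => rfl
  | cons v rest ih =>
      simp only [exampleFourInner]
      by_cases h : PySem.Str.startswith v key = true
      · rw [if_pos h, List.find?_cons_of_pos (by simpa using h)]
      · rw [if_neg h, ih, List.find?_cons_of_neg (by simpa using h)]

-- decomposing "k is p ++ a nonempty prefix of (c :: cs)"
theorem prefix_cons_split (k q p : String) (c : Char) (cs : List Char)
    (hq : q.toList = p.toList ++ [c]) :
    (∃ j < (c :: cs).length, k.toList = p.toList ++ (c :: cs).take (j + 1)) ↔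
      (k = q ∨ ∃ j < cs.length, k.toList = q.toList ++ cs.take (j + 1)) := by
  constructor
  · rintro ⟨j, hj, he⟩
    cases j with
    | zero =>
        left
        apply String.toList_inj.mp
        simpa [hq] using he
    | succ j' =>
        right
        refine ⟨j', by simpa using hj, ?_⟩
        simpa [hq, List.append_assoc] using he
  · rintro (h | ⟨j, hj, he⟩)
    · exact ⟨0, by simp, by simp [h, hq]⟩
    · exact ⟨j + 1, by simpa using Nat.succ_lt_succ hj, by simpa [hq, List.append_assoc] using he⟩

-- the inner character fold of B, fully characterised at an arbitrary key
theorem innerB_get (keys : PySem.Set String) (v : String) (cs : List Char) :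
    ∀ (p : String) (best : PySem.Dict String String) (k : String),
    ((cs.foldl
        (fun st c =>
          let q := st.2.push c
          (if PySem.Set.contains keys q && !st.1.contains q then st.1.insert q v else st.1, q))
        (best, p)).1).get? k =
      if PySem.Set.contains keys k = true ∧ best.get? k = none ∧
          (∃ j < cs.length, k.toList = p.toList ++ cs.take (j + 1)) then some v
      else best.get? k := by
  induction cs with
  | nil => intro p best k; simp
  | cons c cs' ih =>
      intro p best k
      have hq : (p.push c).toList = p.toList ++ [c] := String.toList_push c
      rw [List.foldl_cons]
      simp only
      set q := p.push c with hqdef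
      set best' := if PySem.Set.contains keys q && !best.contains q then best.insert q v else best
        with hb'
      rw [ih q best' k]
      have hsplit := prefix_cons_split k q p c cs' hq
      by_cases hk : k = q
      · have hE' : ¬ ∃ j < cs'.length, k.toList = q.toList ++ cs'.take (j + 1) := by
          rintro ⟨j, hj, he⟩
          rw [hk] at he
          have hlen := congrArg List.length he
          rw [List.length_append, List.length_take] at hlen
          omega
        rw [if_neg (by rintro ⟨_, _, hE⟩; exact hE' hE)]
        by_cases hc : PySem.Set.contains keys k = true
        · by_cases hg : best.get? k = none
          · have hcont : best.contains k = false := by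
              rw [PySem.Dict.contains_eq_isSome_get?, hg]; rfl
            have hcnd : (PySem.Set.contains keys q && !best.contains q) = true := by
              rw [← hk, hc, hcont]; rfl
            have hb'' : best' = best.insert q v := by rw [hb', if_pos hcnd]
            have hgv : best'.get? k = some v := by rw [hb'', hk]; simp [pysem]
            rw [hgv, if_pos ⟨hc, hg, hsplit.mpr (Or.inl hk)⟩]
          · have hcont : best.contains k = true := by
              rw [PySem.Dict.contains_eq_isSome_get?]
              cases h : best.get? k with
              | none => exact absurd h hg
              | some w => rfl
            have hcnd : (PySem.Set.contains keys q && !best.contains q) = false := by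
              rw [← hk, hc, hcont]; rfl
            have hb'' : best' = best := by rw [hb', hcnd]; simp
            rw [hb'', if_neg (by rintro ⟨_, h2, _⟩; exact hg h2)]
        · have hc' : PySem.Set.contains keys q = false := by
            rw [← hk]; cases h : PySem.Set.contains keys k with
            | false => rfl
            | true => exact absurd h hc
          have hcnd : (PySem.Set.contains keys q && !best.contains q) = false := by
            rw [hc']; rfl
          have hb'' : best' = best := by rw [hb', hcnd]; simp
          rw [hb'', if_neg (by rintro ⟨h1, _, _⟩; exact hc h1)]
      · have hget : best'.get? k = best.get? k := by
          rw [hb']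
          split
          · exact PySem.Dict.get?_insert_of_ne _ _ hk
          · rfl
        rw [hget]
        have hiff : (∃ j < (c :: cs').length, k.toList = p.toList ++ (c :: cs').take (j + 1)) ↔
            (∃ j < cs'.length, k.toList = q.toList ++ cs'.take (j + 1)) := by
          rw [hsplit]
          exact or_iff_right hk
        by_cases hP : PySem.Set.contains keys k = true ∧ best.get? k = none ∧
            ∃ j < cs'.length, k.toList = q.toList ++ cs'.take (j + 1)
        · rw [if_pos hP, if_pos ⟨hP.1, hP.2.1, hiff.mpr hP.2.2⟩]
        · rw [if_neg hP, if_neg (by rintro ⟨h1, h2, h3⟩; exact hP ⟨h1, h2, hiff.mp h3⟩)]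

-- "k is a prefix of v"  ↔  "k is the empty string or a nonempty prefix of v"
theorem startswith_split (v k : String) :
    PySem.Str.startswith v k = true ↔
      (k = "" ∨ ∃ j < v.toList.length, k.toList = v.toList.take (j + 1)) := by
  have h1 : PySem.Str.startswith v k = true ↔ k.toList <+: v.toList := by
    simp [PySem.Chars.startswith_iff]
  rw [h1]
  constructor
  · intro hp
    have htake := List.prefix_iff_eq_take.mp hp
    cases hlen : k.toList.length with
    | zero =>
        left
        apply String.toList_inj.mp
        simpa using List.length_eq_zero_iff.mp hlen
    | succ j =>
        right
        have hle : k.toList.length ≤ v.toList.length := hp.length_le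
        exact ⟨j, by omega, by rw [htake, hlen]⟩
  · rintro (h | ⟨j, hj, he⟩)
    · simp [h]
    · rw [he]; exact List.take_prefix _ _

-- one outer step of B, fully characterised at an arbitrary key
theorem stepB_get (keys : PySem.Set String) (best : PySem.Dict String String) (v k : String) :
    (exampleFourStep keys best v).get? k =
      if PySem.Set.contains keys k = true ∧ best.get? k = none ∧
          PySem.Str.startswith v k = true then some v
      else best.get? k := by
  unfold exampleFourStep
  simp only
  set best₀ := if PySem.Set.contains keys "" && !best.contains "" then best.insert "" v else best
    with hb0
  rw [innerB_get keys v v.toList "" best₀ k]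
  by_cases hk : k = ""
  · subst hk
    have hE : ¬ ∃ j < v.toList.length, ("" : String).toList = ("" : String).toList ++ v.toList.take (j + 1) := by
      rintro ⟨j, hj, he⟩
      have hlen := congrArg List.length he
      rw [List.length_append, List.length_take] at hlen
      omega
    rw [if_neg (by rintro ⟨_, _, hE'⟩; exact hE hE')]
    have hs : PySem.Str.startswith v "" = true := (startswith_split v "").mpr (Or.inl rfl)
    by_cases hc : PySem.Set.contains keys "" = true
    · by_cases hg : best.get? "" = none
      · have hcont : best.contains "" = false := by
          rw [PySem.Dict.contains_eq_isSome_get?, hg]; rfl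
        have hcnd : (PySem.Set.contains keys "" && !best.contains "") = true := by
          rw [hc, hcont]; rfl
        have hb0' : best₀ = best.insert "" v := by rw [hb0, if_pos hcnd]
        rw [hb0', PySem.Dict.get?_insert_self, if_pos ⟨hc, hg, hs⟩]
      · have hcont : best.contains "" = true := by
          rw [PySem.Dict.contains_eq_isSome_get?]
          cases h : best.get? "" with
          | none => exact absurd h hg
          | some w => rfl
        have hcnd : (PySem.Set.contains keys "" && !best.contains "") = false := by
          rw [hcont]; simp
        have hb0' : best₀ = best := by rw [hb0, hcnd]; simp
        rw [hb0', if_neg (by rintro ⟨_, h2, _⟩; exact hg h2)]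
    · have hc' : PySem.Set.contains keys "" = false := by
        cases h : PySem.Set.contains keys "" with
        | false => rfl
        | true => exact absurd h hc
      have hcnd : (PySem.Set.contains keys "" && !best.contains "") = false := by
        rw [hc']; rfl
      have hb0' : best₀ = best := by rw [hb0, hcnd]; simp
      rw [hb0', if_neg (by rintro ⟨h1, _, _⟩; exact hc h1)]
  · have hget : best₀.get? k = best.get? k := by
      rw [hb0]
      split
      · exact PySem.Dict.get?_insert_of_ne _ _ hk
      · rfl
    rw [hget]
    have hiff : (∃ j < v.toList.length, k.toList = ("" : String).toList ++ v.toList.take (j + 1)) ↔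
        PySem.Str.startswith v k = true := by
      rw [startswith_split]
      simp [hk]
    by_cases hP : PySem.Set.contains keys k = true ∧ best.get? k = none ∧
        ∃ j < v.toList.length, k.toList = ("" : String).toList ++ v.toList.take (j + 1)
    · rw [if_pos hP, if_pos ⟨hP.1, hP.2.1, hiff.mp hP.2.2⟩]
    · rw [if_neg hP, if_neg (by rintro ⟨h1, h2, h3⟩; exact hP ⟨h1, h2, hiff.mpr h3⟩)]

-- once assigned, a key keeps its value through the rest of B's outer fold
theorem foldl_stepB_some (keys : PySem.Set String) (ws : List String) :
    ∀ (best : PySem.Dict String String) (k : String) (w : String),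
    best.get? k = some w → (ws.foldl (exampleFourStep keys) best).get? k = some w := by
  induction ws with
  | nil => intro best k w h; simpa using h
  | cons v ws' ih =>
      intro best k w h
      rw [List.foldl_cons]
      apply ih
      rw [stepB_get, if_neg (by rintro ⟨_, h2, _⟩; rw [h] at h2; exact Option.some_ne_none w h2), h]

-- B's dict maps each key of the key set to the first matching value of paramTwo
theorem foldl_stepB_none (keys : PySem.Set String) (ws : List String) :
    ∀ (best : PySem.Dict String String) (k : String), best.get? k = none →
    (ws.foldl (exampleFourStep keys) best).get? k =
      if PySem.Set.contains keys k = true then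
        ws.find? (fun v => PySem.Str.startswith v k)
      else none := by
  induction ws with
  | nil =>
      intro best k h
      rw [List.foldl_nil, h, List.find?_nil]
      split <;> rfl
  | cons v ws' ih =>
      intro best k h
      rw [List.foldl_cons]
      by_cases hc : PySem.Set.contains keys k = true
      · by_cases hs : PySem.Str.startswith v k = true
        · have : (exampleFourStep keys best v).get? k = some v := by
            rw [stepB_get, if_pos ⟨hc, h, hs⟩]
          rw [foldl_stepB_some keys ws' _ k v this, hc, if_pos rfl,
            List.find?_cons_of_pos (by simpa using hs)]
        · have hnone : (exampleFourStep keys best v).get? k = none := by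
            rw [stepB_get, if_neg (by rintro ⟨_, _, h3⟩; exact hs h3), h]
          rw [ih _ k hnone, List.find?_cons_of_neg (by simpa using hs)]
      · have hnone : (exampleFourStep keys best v).get? k = none := by
          rw [stepB_get, if_neg (by rintro ⟨h1, _, _⟩; exact hc h1), h]
        rw [ih _ k hnone, if_neg hc, if_neg hc]

-- membership in paramOne makes the key-set test succeed
theorem contains_ofList_of_mem (xs : List String) (k : String) (h : k ∈ xs) :
    PySem.Set.contains (PySem.Set.ofList xs) k = true := by
  rw [PySem.Set.contains_iff]
  exact (PySem.Set.mem_ofList xs k).mpr h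

-- ===== VERDICT (by name: the statement is the Claim_ definition above) =====
theorem exampleFour_spec : Claim_equal_exampleFour := by
  intro paramOne paramTwo _
  unfold Spec_exampleFour exampleFour exampleFour_alt
  congr 1
  apply PySem.List.foldl_congr_mem
  intro res k hk
  rw [exampleFourInner_eq]
  have hbest : (paramTwo.foldl (exampleFourStep (PySem.Set.ofList paramOne)) PySem.Dict.empty).get? k
      = paramTwo.find? (fun v => PySem.Str.startswith v k) := by
    rw [foldl_stepB_none _ _ _ _ (PySem.Dict.get?_empty k),
      if_pos (contains_ofList_of_mem paramOne k hk)]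
  rw [hbest]
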